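-- pv_equiv track=rewrite | github.com/Villex-code/pyproject | working.py | remove_uneeded_zeros
-- ===== SOURCE A (Python) =====
-- def remove_uneeded_zeros(mylist):
--     counter = -1
--     while True:
--         if mylist[counter] == 0 and len(mylist) > 1:
--             mylist.pop(counter)
--         else:
--             break
--     return mylist
-- ===== SOURCE B (Python) =====
-- def remove_uneeded_zeros(mylist):
--     i = len(mylist)
--     while i > 1 and mylist[i - 1] == 0:
--         i -= 1
--     del mylist[i:]
--     return mylist
-- ===== Notes on version B (the rewrite author's own statement) =====
-- stated objective: simpler
-- what changed: B computes the cutoff index by scanning from the end and deletes the tail with one slice deletion, instead of A's loop of repeated pops of the last element; B still mutates the list in place.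
import Mathlib
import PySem

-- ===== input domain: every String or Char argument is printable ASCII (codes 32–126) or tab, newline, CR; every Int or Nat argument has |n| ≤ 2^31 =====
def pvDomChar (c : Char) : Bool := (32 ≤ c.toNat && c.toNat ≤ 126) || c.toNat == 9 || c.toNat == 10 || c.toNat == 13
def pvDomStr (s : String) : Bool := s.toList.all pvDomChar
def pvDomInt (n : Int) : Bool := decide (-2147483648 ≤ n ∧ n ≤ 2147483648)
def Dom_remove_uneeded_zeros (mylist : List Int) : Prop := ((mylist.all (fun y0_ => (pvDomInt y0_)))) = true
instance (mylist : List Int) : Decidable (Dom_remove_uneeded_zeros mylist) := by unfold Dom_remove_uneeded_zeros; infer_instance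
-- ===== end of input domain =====

-- B replaces A's loop of repeated pops of the last element by computing a cutoff index and one bulk
-- slice deletion (simpler decomposition); both mutate the list in place in Python — the
-- equivalence proved here is about the return value only.


-- ===== PORT A =====
-- A: loop: if the last element == 0 and len(mylist) > 1, pop it; else break; return mylist
-- (pyGet? at index minus one returning none is Python's IndexError on the empty list; outside Pre_)
def remove_uneeded_zeros (mylist : List Int) : List Int :=
  match _h : PySem.List.pyGet? mylist (-1) with
  | none => mylist
  | some x =>
    if _h2 : x = 0 ∧ mylist.length > 1 then
      remove_uneeded_zeros mylist.dropLast
    else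
      mylist
termination_by mylist.length
decreasing_by simp [List.length_dropLast]; omega

-- ===== PORT B =====
-- B: i = len(mylist); while i > 1 and mylist[i-1] == 0: i -= 1; del mylist[i:]; return mylist
def pvCut (mylist : List Int) (i : Nat) : Nat :=
  if i > 1 ∧ PySem.List.pyGet? mylist ((i : Int) - 1) = some 0 then
    pvCut mylist (i - 1)
  else
    i
termination_by i

def remove_uneeded_zeros_alt (mylist : List Int) : List Int :=
  mylist.take (pvCut mylist mylist.length)

-- ===== PRECONDITION & SPEC =====
-- Pre_: Python A indexes the last element, which raises IndexError on the empty list.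
def Pre_remove_uneeded_zeros (mylist : List Int) : Prop := mylist ≠ []
instance (mylist : List Int) : Decidable (Pre_remove_uneeded_zeros mylist) := by unfold Pre_remove_uneeded_zeros; infer_instance
def pvWitness_remove_uneeded_zeros : List Int := [1, 0]

def Spec_remove_uneeded_zeros (mylist : List Int) (out : List Int) : Prop := out = remove_uneeded_zeros_alt mylist
instance (mylist : List Int) (out : List Int) : Decidable (Spec_remove_uneeded_zeros mylist out) := by unfold Spec_remove_uneeded_zeros; infer_instance

-- ===== CLAIM (what is proved, stated in full; the proofs are below) =====
def Claim_equal_remove_uneeded_zeros : Prop := ∀ (mylist : List Int), Dom_remove_uneeded_zeros mylist → Pre_remove_uneeded_zeros mylist → Spec_remove_uneeded_zeros mylist (remove_uneeded_zeros mylist)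

-- ===== LEMMAS AND PROOFS =====

theorem pvCut_le (l : List Int) (i : Nat) : pvCut l i ≤ i := by
  unfold pvCut
  split
  · have := pvCut_le l (i - 1); omega
  · exact le_refl i
termination_by i

-- pvCut only inspects indices < i - 1 + 1 = i, i.e. a prefix of length i, so dropping the last
-- element does not change it as long as i ≤ (l.dropLast).length.
theorem pvCut_dropLast (l : List Int) (i : Nat) (h : i ≤ l.length - 1) :
    pvCut l.dropLast i = pvCut l i := by
  conv_lhs => rw [pvCut]
  conv_rhs => rw [pvCut]
  by_cases hi : i > 1
  · have hcast : (i : Int) - 1 = ((i - 1 : Nat) : Int) := by omega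
    have hidx : l.dropLast[(i-1 : Nat)]? = l[(i-1 : Nat)]? := by
      rw [List.getElem?_dropLast]
      simp only [if_pos (by omega : i - 1 < l.length - 1)]
    simp only [hcast, PySem.List.pyGet?_natCast, hidx]
    split
    · exact pvCut_dropLast l (i - 1) (by omega)
    · rfl
  · simp [hi]
termination_by i

theorem main_eq (l : List Int) (h : l ≠ []) :
    remove_uneeded_zeros l = remove_uneeded_zeros_alt l := by
  obtain ⟨x, hx⟩ := Option.isSome_iff_exists.mp (List.getLast?_isSome.mpr h)
  have hlen : 1 ≤ l.length := List.length_pos_iff.mpr h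
  have hlast : l[l.length - 1]? = some x := by
    rw [← List.getLast?_eq_getElem?]; exact hx
  have hcast : (l.length : Int) - 1 = ((l.length - 1 : Nat) : Int) := by omega
  rw [remove_uneeded_zeros]
  rw [PySem.List.pyGet?_neg_one, hx]
  simp only []
  unfold remove_uneeded_zeros_alt
  rw [pvCut]
  by_cases hc : x = 0 ∧ l.length > 1
  · have hcond : l.length > 1 ∧ PySem.List.pyGet? l ((l.length : Int) - 1) = some 0 := by
      rw [hcast, PySem.List.pyGet?_natCast, hlast]
      exact ⟨hc.2, by rw [hc.1]⟩
    rw [dif_pos hc, if_pos hcond]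
    have hdl : l.dropLast ≠ [] := by
      have : l.dropLast.length = l.length - 1 := by simp
      intro hnil; rw [hnil] at this; simp at this; omega
    have hrec := main_eq l.dropLast hdl
    rw [hrec]
    unfold remove_uneeded_zeros_alt
    have hdlen : l.dropLast.length = l.length - 1 := by simp
    rw [hdlen, pvCut_dropLast l (l.length - 1) (le_refl _)]
    have hle : pvCut l (l.length - 1) ≤ l.length - 1 := pvCut_le l _
    rw [List.dropLast_eq_take, List.take_take]
    congr 1
    omega
  · have hcond : ¬ (l.length > 1 ∧ PySem.List.pyGet? l ((l.length : Int) - 1) = some 0) := by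
      rw [hcast, PySem.List.pyGet?_natCast, hlast]
      intro ⟨h1, h2⟩
      exact hc ⟨by injection h2, h1⟩
    rw [dif_neg hc, if_neg hcond, List.take_length]
termination_by l.length
decreasing_by simp [List.length_dropLast]; omega

-- ===== VERDICT (by name: the statement is the Claim_ definition above) =====
theorem remove_uneeded_zeros_spec : Claim_equal_remove_uneeded_zeros := by
  intro l _ hpre
  unfold Spec_remove_uneeded_zeros
  exact main_eq l hpre
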